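-- pv_equiv track=rewrite | github.com/MostafaKandel/Master_Thesis | main.py | eliminate_brackets
-- ===== SOURCE A (Python) =====
-- def eliminate_brackets(text):
--     """
--     Eliminate brackets from the given text.
--
--     Args:
--         text (str): Input text.
--
--     Returns:
--         str: Text with brackets removed.
--     """
--     if text is not None:
--
--         if text.count('(') != text.count(')'):
--
--             if '(' in text and ')' not in text:
--                 return eliminate_brackets(text.replace('(', ''))
--             elif ')' in text and '(' not in text:
--                 return eliminate_brackets(text.replace(')', ''))
--             elif text.startswith('('):
--                 return eliminate_brackets(text[1:])
--             elif text.endswith(')'):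
--                 return eliminate_brackets(text[:-1])
--             elif text.startswith('∑('):
--                 return eliminate_brackets(text[0:1] + text[2:])
--             elif text.startswith('(') and text.endswith(')'):
--                 return eliminate_brackets(text[1:-1])
--
--             elif '[' in text and ']' not in text:
--                 return eliminate_brackets(text.replace('[', ''))
--             elif ']' in text and '[' not in text:
--                 return eliminate_brackets(text.replace(']', ''))
--             elif text.startswith('['):
--                 return eliminate_brackets(text[1:])
--             elif text.endswith(']') or text.endswith(']]'):
--                 return eliminate_brackets(text[:-1])
--             elif text.startswith('{'):
--                 return eliminate_brackets(text[1:])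
--             elif text.endswith('}'):
--                 return eliminate_brackets(text[:-1])
--             else:
--                 return text
--         else:
--             if '[' in text and ']' not in text:
--                 return eliminate_brackets(text.replace('[', ''))
--             elif text.startswith('('):
--                 return eliminate_brackets(text[1:])
--             elif ']' in text and '[' not in text:
--                 return eliminate_brackets(text.replace(']', ''))
--             elif text.startswith('['):
--                 return eliminate_brackets(text[1:])
--             elif text.endswith(']') and '[' not in text:
--                 return eliminate_brackets(text[:-1])
--             elif text.startswith('{'):
--                 return eliminate_brackets(text[1:])
--             elif text.endswith('}'):
--                 return eliminate_brackets(text[:-1])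
--             else:
--                 return text
-- ===== SOURCE B (Python) =====
-- # Table-driven iterative version: each rewrite rule is a (guard, action) pair;
-- # pick the rule table by the '('/')' count comparison, apply the first matching
-- # rule, repeat until none matches.  A's provably unreachable branches
-- # ('(' ... ')' pair-strip after the startswith('(') rule, the ']]' disjunct,
-- # and the equal-case endswith(']') rule shadowed by the ']'-without-'[' rule)
-- # carry no rule of their own.
--
-- def _del(ch):
--     return (lambda t: ch in t, lambda t: t.replace(ch, ''))
--
-- def _del_if_no(ch, other):
--     return (lambda t: ch in t and other not in t, lambda t: t.replace(ch, ''))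
--
-- def _drop_first(ch):
--     return (lambda t: t.startswith(ch), lambda t: t[1:])
--
-- def _drop_last(ch):
--     return (lambda t: t.endswith(ch), lambda t: t[:-1])
--
-- _RULES_NE = [
--     _del_if_no('(', ')'),
--     _del_if_no(')', '('),
--     _drop_first('('),
--     _drop_last(')'),
--     (lambda t: t.startswith('\u2211('), lambda t: t[0:1] + t[2:]),
--     _del_if_no('[', ']'),
--     _del_if_no(']', '['),
--     _drop_first('['),
--     _drop_last(']'),
--     _drop_first('{'),
--     _drop_last('}'),
-- ]
--
-- _RULES_EQ = [
--     _del_if_no('[', ']'),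
--     _drop_first('('),
--     _del_if_no(']', '['),
--     _drop_first('['),
--     _drop_first('{'),
--     _drop_last('}'),
-- ]
--
-- def eliminate_brackets(text):
--     if text is None:
--         return None
--     while True:
--         rules = _RULES_NE if text.count('(') != text.count(')') else _RULES_EQ
--         for guard, action in rules:
--             if guard(text):
--                 text = action(text)
--                 break
--         else:
--             return text
-- ===== Notes on version B (the rewrite author's own statement) =====
-- stated objective: alternative
-- what changed: Replaced A's self-recursive elif chain by an iterative fixpoint loop over a data-driven rule table (lists of guard/action pairs, first match applied), dropping A's provably unreachable branches instead of re-encoding them.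
import Mathlib
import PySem

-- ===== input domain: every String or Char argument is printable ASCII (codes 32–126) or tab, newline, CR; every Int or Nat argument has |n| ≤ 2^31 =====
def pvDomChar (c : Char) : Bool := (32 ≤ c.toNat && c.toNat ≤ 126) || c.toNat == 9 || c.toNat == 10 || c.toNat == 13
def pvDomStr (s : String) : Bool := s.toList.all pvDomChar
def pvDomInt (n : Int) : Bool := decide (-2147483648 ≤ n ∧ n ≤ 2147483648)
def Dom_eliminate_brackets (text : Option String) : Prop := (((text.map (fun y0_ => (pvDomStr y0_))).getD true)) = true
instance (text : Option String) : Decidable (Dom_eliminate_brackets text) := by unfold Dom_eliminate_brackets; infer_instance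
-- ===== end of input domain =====

-- B replaces A's recursive elif chain by an iterative fixpoint loop over a data-driven rule table (first matching guard/action pair), with A's unreachable branches dropped; same values everywhere.


-- ===== PORT A =====
-- Literal port of A's recursion; fuel = length + 1 only makes it total (each
-- recursive call in A strictly shortens the string, so the fuel never runs out).
def eliminate_brackets_go : Nat → List Char → List Char
  | 0, t => t
  | fuel+1, t =>
    if PySem.Chars.count t ['('] ≠ PySem.Chars.count t [')'] then
      if PySem.Chars.isIn ['('] t && !PySem.Chars.isIn [')'] t then
        eliminate_brackets_go fuel (PySem.Chars.replace t ['('] [])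
      else if PySem.Chars.isIn [')'] t && !PySem.Chars.isIn ['('] t then
        eliminate_brackets_go fuel (PySem.Chars.replace t [')'] [])
      else if PySem.Chars.startswith t ['('] then
        eliminate_brackets_go fuel (PySem.Chars.slice t (some 1) none)
      else if PySem.Chars.endswith t [')'] then
        eliminate_brackets_go fuel (PySem.Chars.slice t none (some (-1)))
      else if PySem.Chars.startswith t ['∑', '('] then
        eliminate_brackets_go fuel (PySem.Chars.slice t (some 0) (some 1) ++ PySem.Chars.slice t (some 2) none)
      else if PySem.Chars.startswith t ['('] && PySem.Chars.endswith t [')'] then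
        eliminate_brackets_go fuel (PySem.Chars.slice t (some 1) (some (-1)))
      else if PySem.Chars.isIn ['['] t && !PySem.Chars.isIn [']'] t then
        eliminate_brackets_go fuel (PySem.Chars.replace t ['['] [])
      else if PySem.Chars.isIn [']'] t && !PySem.Chars.isIn ['['] t then
        eliminate_brackets_go fuel (PySem.Chars.replace t [']'] [])
      else if PySem.Chars.startswith t ['['] then
        eliminate_brackets_go fuel (PySem.Chars.slice t (some 1) none)
      else if PySem.Chars.endswith t [']'] || PySem.Chars.endswith t [']', ']'] then
        eliminate_brackets_go fuel (PySem.Chars.slice t none (some (-1)))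
      else if PySem.Chars.startswith t ['{'] then
        eliminate_brackets_go fuel (PySem.Chars.slice t (some 1) none)
      else if PySem.Chars.endswith t ['}'] then
        eliminate_brackets_go fuel (PySem.Chars.slice t none (some (-1)))
      else t
    else
      if PySem.Chars.isIn ['['] t && !PySem.Chars.isIn [']'] t then
        eliminate_brackets_go fuel (PySem.Chars.replace t ['['] [])
      else if PySem.Chars.startswith t ['('] then
        eliminate_brackets_go fuel (PySem.Chars.slice t (some 1) none)
      else if PySem.Chars.isIn [']'] t && !PySem.Chars.isIn ['['] t then
        eliminate_brackets_go fuel (PySem.Chars.replace t [']'] [])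
      else if PySem.Chars.startswith t ['['] then
        eliminate_brackets_go fuel (PySem.Chars.slice t (some 1) none)
      else if PySem.Chars.endswith t [']'] && !PySem.Chars.isIn ['['] t then
        eliminate_brackets_go fuel (PySem.Chars.slice t none (some (-1)))
      else if PySem.Chars.startswith t ['{'] then
        eliminate_brackets_go fuel (PySem.Chars.slice t (some 1) none)
      else if PySem.Chars.endswith t ['}'] then
        eliminate_brackets_go fuel (PySem.Chars.slice t none (some (-1)))
      else t

def eliminate_brackets (text : Option String) : Option String :=
  match text with
  | none => none
  | some s => some (String.ofList (eliminate_brackets_go (s.toList.length + 1) s.toList))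

-- ===== PORT B =====
-- A rewrite rule is a (guard, action) pair; these mirror Source B's rule builders.
def ebRule : Type := (List Char → Bool) × (List Char → List Char)

def ebDelIfNo (c o : Char) : ebRule :=
  (fun t => PySem.Chars.isIn [c] t && !PySem.Chars.isIn [o] t,
   fun t => PySem.Chars.replace t [c] [])

def ebDropFirst (c : Char) : ebRule :=
  (fun t => PySem.Chars.startswith t [c], fun t => PySem.Chars.slice t (some 1) none)

def ebDropLast (c : Char) : ebRule :=
  (fun t => PySem.Chars.endswith t [c], fun t => PySem.Chars.slice t none (some (-1)))

def ebRulesNE : List ebRule :=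
  [ebDelIfNo '(' ')', ebDelIfNo ')' '(', ebDropFirst '(', ebDropLast ')',
   (fun t => PySem.Chars.startswith t ['∑', '('],
    fun t => PySem.Chars.slice t (some 0) (some 1) ++ PySem.Chars.slice t (some 2) none),
   ebDelIfNo '[' ']', ebDelIfNo ']' '[', ebDropFirst '[', ebDropLast ']',
   ebDropFirst '{', ebDropLast '}']

def ebRulesEQ : List ebRule :=
  [ebDelIfNo '[' ']', ebDropFirst '(', ebDelIfNo ']' '[', ebDropFirst '[',
   ebDropFirst '{', ebDropLast '}']

-- Source B's inner for-else: first rule whose guard fires, or none.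
def ebFirst : List ebRule → List Char → Option (List Char)
  | [], _ => none
  | (g, a) :: rs, t => if g t then some (a t) else ebFirst rs t

-- Source B's while-loop: pick the table by the count comparison, apply the first
-- matching rule, repeat; fuel = length + 1 only makes it total (every rule
-- strictly shortens the string).
def ebLoop : Nat → List Char → List Char
  | 0, t => t
  | fuel+1, t =>
    match ebFirst (if PySem.Chars.count t ['('] ≠ PySem.Chars.count t [')'] then ebRulesNE else ebRulesEQ) t with
    | none => t
    | some t' => ebLoop fuel t'

def eliminate_brackets_alt (text : Option String) : Option String :=
  match text with
  | none => none
  | some s => some (String.ofList (ebLoop (s.toList.length + 1) s.toList))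

-- ===== PRECONDITION & SPEC =====
def Spec_eliminate_brackets (text : Option String) (out : Option String) : Prop := out = eliminate_brackets_alt text
instance (text : Option String) (out : Option String) : Decidable (Spec_eliminate_brackets text out) := by unfold Spec_eliminate_brackets; infer_instance

-- ===== CLAIM (what is proved, stated in full; the proofs are below) =====
def Claim_equal_eliminate_brackets : Prop := ∀ (text : Option String), Dom_eliminate_brackets text → Spec_eliminate_brackets text (eliminate_brackets text)

-- ===== LEMMAS AND PROOFS =====
theorem endswith_pair_right (t : List Char) (c : Char)
    (h : PySem.Chars.endswith t [c, c] = true) : PySem.Chars.endswith t [c] = true := by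
  rw [PySem.Chars.endswith_iff] at h ⊢
  exact List.IsSuffix.trans ⟨[c], rfl⟩ h

theorem isIn_of_endswith (t : List Char) (c : Char)
    (h : PySem.Chars.endswith t [c] = true) : PySem.Chars.isIn [c] t = true := by
  rw [PySem.Chars.endswith_iff] at h
  rw [PySem.Chars.isIn_iff_infix]
  exact h.isInfix

theorem elim_ebFirst_cons (g : List Char → Bool) (a : List Char → List Char)
    (rs : List ebRule) (t : List Char) (k : List Char → List Char) :
    (ebFirst ((g, a) :: rs) t).elim t k = if g t then k (a t) else (ebFirst rs t).elim t k := by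
  simp only [ebFirst]
  split_ifs <;> simp

set_option maxHeartbeats 1000000 in
theorem go_succ (f : Nat) (t : List Char) :
    eliminate_brackets_go (f+1) t =
      (ebFirst (if PySem.Chars.count t ['('] ≠ PySem.Chars.count t [')'] then ebRulesNE else ebRulesEQ) t).elim
        t (eliminate_brackets_go f) := by
  have e1 := endswith_pair_right t ']'
  have e2 := isIn_of_endswith t ']'
  by_cases hc : PySem.Chars.count t ['('] ≠ PySem.Chars.count t [')']
  · rw [if_pos hc]
    unfold eliminate_brackets_go
    rw [if_pos hc]
    unfold ebRulesNE ebDelIfNo ebDropFirst ebDropLast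
    rw [elim_ebFirst_cons, elim_ebFirst_cons, elim_ebFirst_cons, elim_ebFirst_cons,
        elim_ebFirst_cons, elim_ebFirst_cons, elim_ebFirst_cons, elim_ebFirst_cons,
        elim_ebFirst_cons, elim_ebFirst_cons, elim_ebFirst_cons]
    rw [show (ebFirst ([] : List ebRule) t).elim t (eliminate_brackets_go f) = t from rfl]
    apply if_ctx_congr Iff.rfl (fun _ => rfl); intro h1      -- '(' w/o ')'
    apply if_ctx_congr Iff.rfl (fun _ => rfl); intro h2      -- ')' w/o '('
    apply if_ctx_congr Iff.rfl (fun _ => rfl); intro h3      -- starts '('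
    apply if_ctx_congr Iff.rfl (fun _ => rfl); intro h4      -- ends ')'
    apply if_ctx_congr Iff.rfl (fun _ => rfl); intro h5      -- starts '∑('
    rw [if_neg (fun hh => h3 ((Bool.and_eq_true _ _).mp hh).1)]   -- dead: starts '(' ∧ ends ')'
    apply if_ctx_congr Iff.rfl (fun _ => rfl); intro h7      -- '[' w/o ']'
    apply if_ctx_congr Iff.rfl (fun _ => rfl); intro h8      -- ']' w/o '['
    apply if_ctx_congr Iff.rfl (fun _ => rfl); intro h9      -- starts '['
    apply if_ctx_congr
      ⟨fun h => by rcases (Bool.or_eq_true _ _).mp h with h | h; exacts [h, e1 h],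
       fun h => (Bool.or_eq_true _ _).mpr (Or.inl h)⟩
      (fun _ => rfl)                                          -- ends ']' (A also tests ']]')
    intro h10
    apply if_ctx_congr Iff.rfl (fun _ => rfl); intro h11     -- starts '{'
    exact if_ctx_congr Iff.rfl (fun _ => rfl) (fun _ => rfl) -- ends '}'

  · rw [if_neg hc]
    unfold eliminate_brackets_go
    rw [if_neg hc]
    unfold ebRulesEQ ebDelIfNo ebDropFirst ebDropLast
    rw [elim_ebFirst_cons, elim_ebFirst_cons, elim_ebFirst_cons, elim_ebFirst_cons,
        elim_ebFirst_cons, elim_ebFirst_cons]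
    rw [show (ebFirst ([] : List ebRule) t).elim t (eliminate_brackets_go f) = t from rfl]
    apply if_ctx_congr Iff.rfl (fun _ => rfl); intro h1      -- '[' w/o ']'
    apply if_ctx_congr Iff.rfl (fun _ => rfl); intro h2      -- starts '('
    apply if_ctx_congr Iff.rfl (fun _ => rfl); intro h3      -- ']' w/o '['
    apply if_ctx_congr Iff.rfl (fun _ => rfl); intro h4      -- starts '['
    rw [if_neg (fun hh =>                                     -- dead: ends ']' ∧ no '[' (shadowed)
      h3 ((Bool.and_eq_true _ _).mpr
        ⟨e2 ((Bool.and_eq_true _ _).mp hh).1, ((Bool.and_eq_true _ _).mp hh).2⟩))]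


theorem go_eq_loop (fuel : Nat) : ∀ t, eliminate_brackets_go fuel t = ebLoop fuel t := by
  induction fuel with
  | zero => intro t; rfl
  | succ f ih =>
    intro t
    rw [go_succ]
    simp only [ebLoop]
    cases ebFirst (if PySem.Chars.count t ['('] ≠ PySem.Chars.count t [')'] then ebRulesNE else ebRulesEQ) t with
    | none => rfl
    | some t' => exact ih t'

-- ===== VERDICT (by name: the statement is the Claim_ definition above) =====
theorem eliminate_brackets_spec : Claim_equal_eliminate_brackets := by
  intro text _
  unfold Spec_eliminate_brackets eliminate_brackets eliminate_brackets_alt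
  cases text with
  | none => rfl
  | some s => simp [go_eq_loop]
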